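-- pv_equiv track=rewrite | github.com/rabeeh003/data-structures | DS2/bubblesort.py | BSAoudNum
-- ===== SOURCE A (Python) =====
-- def BSAoudNum(arr):
--     ret = []
--     for i in range(len(arr)):
--         for j in range(len(arr)-i-1):
--             if arr[j] > arr[j+1]:
--                 arr[j], arr[j+1] = arr[j+1], arr[j]
--     for k in arr:
--         if k % 2 != 0:
--             ret.append(k)
--     return ret
-- ===== SOURCE B (Python) =====
-- def BSAoudNum(arr):
--     return sorted(k for k in arr if k % 2 != 0)
-- ===== Notes on version B (the rewrite author's own statement) =====
-- stated objective: faster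
-- what changed: B filters the odd elements first and sorts only those with Python's built-in Timsort, replacing A's full quadratic bubble sort followed by an odd-filter pass; B does not mutate arr in place (return value only).
import Mathlib
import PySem

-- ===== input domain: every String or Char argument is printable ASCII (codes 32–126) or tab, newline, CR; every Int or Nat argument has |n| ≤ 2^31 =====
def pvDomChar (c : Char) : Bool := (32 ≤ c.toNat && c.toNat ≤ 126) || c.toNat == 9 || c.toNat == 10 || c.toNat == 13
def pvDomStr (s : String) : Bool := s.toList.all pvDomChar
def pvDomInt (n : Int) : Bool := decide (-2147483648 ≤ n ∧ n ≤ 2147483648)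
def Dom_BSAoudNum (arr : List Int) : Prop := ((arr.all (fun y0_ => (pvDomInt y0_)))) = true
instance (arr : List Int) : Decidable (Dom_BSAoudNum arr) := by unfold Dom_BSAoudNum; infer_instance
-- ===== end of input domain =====

-- B replaces A's in-place bubble sort + odd-filter pass by filtering the odds first and
-- sorting only those with the built-in sort (faster); A mutates arr in place, B does not:
-- the equivalence proved here is about the RETURN value only.


-- ===== PORT A =====
-- inner loop 'for j in range(len(arr)-i-1): if arr[j] > arr[j+1]: swap' as the obvious
-- structural recursion over the list, doing m adjacent compare-and-swap steps
def pvPassA : Nat → List Int → List Int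
  | 0, l => l
  | _ + 1, [] => []
  | _ + 1, [x] => [x]
  | m + 1, x :: y :: t => if x > y then y :: pvPassA m (x :: t) else x :: pvPassA m (y :: t)

-- outer loop 'for i in range(len(arr)): <inner pass>' (n = len(arr) is fixed by the loop)
def pvOuterA (n : Nat) (a : List Int) : List Int :=
  (List.range n).foldl (fun a i => pvPassA (n - i - 1) a) a

def BSAoudNum (arr : List Int) : List Int :=
  let a := pvOuterA arr.length arr
  a.foldl (fun ret k => if PySem.Int.mod k 2 ≠ 0 then ret ++ [k] else ret) []

-- ===== PORT B =====
def BSAoudNum_alt (arr : List Int) : List Int :=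
  PySem.List.sorted (arr.filter (fun k => PySem.Int.mod k 2 != 0)) (fun x => x) false

-- ===== PRECONDITION & SPEC =====
def Spec_BSAoudNum (arr : List Int) (out : List Int) : Prop := out = BSAoudNum_alt arr
instance (arr : List Int) (out : List Int) : Decidable (Spec_BSAoudNum arr out) := by unfold Spec_BSAoudNum; infer_instance

-- ===== CLAIM (what is proved, stated in full; the proofs are below) =====
def Claim_equal_BSAoudNum : Prop := ∀ (arr : List Int), Dom_BSAoudNum arr → Spec_BSAoudNum arr (BSAoudNum arr)

-- ===== LEMMAS AND PROOFS =====

theorem pvPassA_cons2 (m : Nat) (x y : Int) (t : List Int) :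
    pvPassA (m + 1) (x :: y :: t) =
      if x > y then y :: pvPassA m (x :: t) else x :: pvPassA m (y :: t) := rfl

theorem pvPassA_perm : ∀ (m : Nat) (l : List Int), (pvPassA m l).Perm l := by
  intro m
  induction m with
  | zero => intro l; simp [pvPassA]
  | succ m ih =>
    intro l
    match l with
    | [] => simp [pvPassA]
    | [x] => simp [pvPassA]
    | x :: y :: t =>
      rw [pvPassA_cons2]
      split
      · exact ((ih (x :: t)).cons y).trans (List.Perm.swap x y t)
      · exact (ih (y :: t)).cons x

theorem pvPassA_append : ∀ (m : Nat) (u v : List Int), m < u.length →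
    pvPassA m (u ++ v) = pvPassA m u ++ v := by
  intro m
  induction m with
  | zero => intro u v _; simp [pvPassA]
  | succ m ih =>
    intro u v h
    match u with
    | [] => simp at h
    | [x] => simp at h
    | x :: y :: t =>
      have ht : m < (x :: t).length := by simp at h ⊢; omega
      have ht' : m < (y :: t).length := by simp at h ⊢; omega
      show pvPassA (m + 1) (x :: y :: (t ++ v)) = pvPassA (m + 1) (x :: y :: t) ++ v
      rw [pvPassA_cons2, pvPassA_cons2]
      split
      · rw [show x :: (t ++ v) = (x :: t) ++ v from rfl, ih (x :: t) v ht]; simp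
      · rw [show y :: (t ++ v) = (y :: t) ++ v from rfl, ih (y :: t) v ht']; simp

theorem pvPassA_max2 : ∀ (t : List Int) (a b : Int),
    ∃ u M, pvPassA (t.length + 1) (a :: b :: t) = u ++ [M] ∧ ∀ x ∈ a :: b :: t, x ≤ M := by
  intro t
  induction t with
  | nil =>
    intro a b
    by_cases h : a > b
    · exact ⟨[b], a, by simp [pvPassA, h], by intro x hx; simp at hx; rcases hx with rfl | rfl <;> omega⟩
    · exact ⟨[a], b, by simp [pvPassA, h], by intro x hx; simp at hx; rcases hx with rfl | rfl <;> omega⟩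
  | cons z t' ih =>
    intro a b
    by_cases h : a > b
    · obtain ⟨u, M, heq, hb⟩ := ih a z
      refine ⟨b :: u, M, ?_, ?_⟩
      · show (if a > b then b :: pvPassA ((z :: t').length) (a :: z :: t')
              else a :: pvPassA ((z :: t').length) (b :: z :: t')) = (b :: u) ++ [M]
        rw [if_pos h, show (z :: t').length = t'.length + 1 from rfl, heq]; simp
      · intro x hx
        simp only [List.mem_cons] at hx
        rcases hx with rfl | rfl | hx
        · exact hb x (by simp)
        · have := hb a (by simp); omega
        · exact hb x (by simp [hx])
    · obtain ⟨u, M, heq, hb⟩ := ih b z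
      refine ⟨a :: u, M, ?_, ?_⟩
      · show (if a > b then b :: pvPassA ((z :: t').length) (a :: z :: t')
              else a :: pvPassA ((z :: t').length) (b :: z :: t')) = (a :: u) ++ [M]
        rw [if_neg h, show (z :: t').length = t'.length + 1 from rfl, heq]; simp
      · intro x hx
        simp only [List.mem_cons] at hx
        rcases hx with rfl | rfl | hx
        · have := hb b (by simp); omega
        · exact hb x (by simp)
        · exact hb x (by simp [hx])

theorem pvPassA_max : ∀ (u : List Int), u ≠ [] →
    ∃ u' M, pvPassA (u.length - 1) u = u' ++ [M] ∧ ∀ x ∈ u, x ≤ M := by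
  intro u hu
  match u with
  | [x] => exact ⟨[], x, by simp [pvPassA], by intro y hy; simp at hy; omega⟩
  | a :: b :: t =>
    have : (a :: b :: t).length - 1 = t.length + 1 := by simp
    rw [this]
    exact pvPassA_max2 t a b

theorem pvOuterA_inv (arr : List Int) :
    ∀ i ≤ arr.length, ∃ u v,
      (List.range i).foldl (fun a j => pvPassA (arr.length - j - 1) a) arr = u ++ v ∧
      u.length = arr.length - i ∧ v.Pairwise (· ≤ ·) ∧
      (∀ x ∈ u, ∀ y ∈ v, x ≤ y) ∧ (u ++ v).Perm arr := by
  intro i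
  induction i with
  | zero =>
    intro _
    exact ⟨arr, [], by simp, by simp, by simp, by simp, by simp⟩
  | succ i ih =>
    intro hi
    obtain ⟨u, v, heq, hlen, hsv, hcross, hperm⟩ := ih (by omega)
    have hu : u ≠ [] := by
      intro h; subst h; simp at hlen; omega
    have hm : arr.length - i - 1 < u.length := by omega
    obtain ⟨u', M, hpass, hmax⟩ := pvPassA_max u hu
    have hul : arr.length - i - 1 = u.length - 1 := by omega
    have hstep : (List.range (i + 1)).foldl (fun a j => pvPassA (arr.length - j - 1) a) arr
        = u' ++ (M :: v) := by
      rw [List.range_succ, List.foldl_append, heq]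
      simp only [List.foldl_cons, List.foldl_nil]
      rw [hul, pvPassA_append (u.length - 1) u v (by omega), hpass]
      simp
    have hpermu : (u' ++ [M]).Perm u := by rw [← hpass]; exact pvPassA_perm _ u
    have hMmem : M ∈ u := hpermu.mem_iff.mp (by simp)
    have hsubu : ∀ x ∈ u', x ∈ u := fun x hx => hpermu.mem_iff.mp (by simp [hx])
    refine ⟨u', M :: v, hstep, ?_, ?_, ?_, ?_⟩
    · have := hpermu.length_eq; simp at this; omega
    · exact List.pairwise_cons.mpr ⟨fun y hy => hcross M hMmem y hy, hsv⟩
    · intro x hx y hy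
      rcases List.mem_cons.mp hy with rfl | hy
      · exact hmax x (hsubu x hx)
      · exact hcross x (hsubu x hx) y hy
    · have h1 : u' ++ (M :: v) = (u' ++ [M]) ++ v := by simp
      rw [h1]
      exact (hpermu.append_right v).trans hperm

theorem pvOuterA_sorted (arr : List Int) :
    (pvOuterA arr.length arr).Pairwise (· ≤ ·) ∧ (pvOuterA arr.length arr).Perm arr := by
  obtain ⟨u, v, heq, hlen, hsv, _, hperm⟩ := pvOuterA_inv arr arr.length le_rfl
  have hu : u = [] := by
    cases u with
    | nil => rfl
    | cons a t => simp at hlen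
  subst hu
  simp only [List.nil_append] at heq hperm
  exact ⟨by rw [pvOuterA, heq]; exact hsv, by rw [pvOuterA, heq]; exact hperm⟩

-- ===== VERDICT (by name: the statement is the Claim_ definition above) =====
theorem BSAoudNum_spec : Claim_equal_BSAoudNum := by
  intro arr _
  unfold Spec_BSAoudNum BSAoudNum BSAoudNum_alt
  obtain ⟨hsorted, hperm⟩ := pvOuterA_sorted arr
  have hfold : (pvOuterA arr.length arr).foldl
      (fun ret k => if PySem.Int.mod k 2 ≠ 0 then ret ++ [k] else ret) []
      = (pvOuterA arr.length arr).filter (fun k => PySem.Int.mod k 2 != 0) := by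
    rw [PySem.List.foldl_append_ite_eq_filter]
    exact List.filter_congr (fun x _ => by rcases Int.emod_two_eq x with h | h <;> simp [bne, h])
  rw [hfold]
  exact (PySem.List.sorted_id_eq_of_perm_of_pairwise _ _ (hperm.filter _) (hsorted.filter _)).symm
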